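-- pv_equiv track=rewrite | github.com/VMaltaL/Projetos_Gradua-o | crivo_de _erastotenes.py | maioriIntervaloSemPrimos
-- ===== SOURCE A (Python) =====
-- import math
--
-- def criaListaCrivoEratostenes(n):
--
--     """
--     (int) -> list
--     Recebe um inteiro positivo n, n >= 2, e cria uma lista crivo[0...n] tal que
--     para cada i, 0 <= i <= n, crivo[i]  ́e True se i  ́e primo e
--     crivo[i]  ́e False se i  ́e não  ́e primo.
--     A lista crivo  ́e criada implementando o algoritmo do Crivo de Eratóstenes.
--     Esta função retorna a lista crivo.
--
--     """
--
--
--     raizn = int(math.sqrt(n))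
--
--     crivo = [False, False]
--     for i in range(2, n+1, 1):
--         crivo.append(True)
--
--     for i in range(2, raizn+1, 1):
--         if crivo[i]:
--             for j in range(i*i, n+1, i):
--                 crivo[j] = False
--
--     return crivo
--
-- def criaListaPrimos(crivo):
--     """ (list) -> list
--     Recebe uma lista crivo que foi criada utilizando o algoritmo do Crivo de
--     Eratóstenes. A partir da lista crivo, esta função cria e retorna uma lista
--     chamada primos, contendo todos os números primos, em ordem crescente.
--     """
--
--     tamanho = len(crivo)
--     primos = []
--
--     for i in range(0, tamanho, 1):
--         if crivo[i]:
--             primos.append(i)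
--
--     return primos
--
-- def maioriIntervaloSemPrimos(n):
--
--
--     crivo = criaListaCrivoEratostenes(n)
--     lista = criaListaPrimos(crivo)
--     r = 0
--     s = 0
--     maiorintervalo = 0
--
--     for i in range(0, len(lista)-1, 1):
--         intervaloatual = lista[i + 1] - lista[i]
--
--         if intervaloatual > maiorintervalo:
--             maiorintervalo = intervaloatual
--             r = lista[i]
--             s = lista[i + 1]
--
--     return r, s
-- ===== SOURCE B (Python) =====
-- import math
--
--
-- def _eh_primo(k):
--     # direct trial-division primality test: 2, then odd candidates up to sqrt(k)
--     if k < 2: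
--         return False
--     if k % 2 == 0:
--         return k == 2
--     d = 3
--     while d * d <= k:
--         if k % d == 0:
--             return False
--         d += 2
--     return True
--
--
-- def maioriIntervaloSemPrimos(n):
--     # No sieve and no prime list: test each number by trial division in one
--     # pass, carrying only the previous prime and the best gap so far.
--     r = 0
--     s = 0
--     maiorintervalo = 0
--     anterior = None
--     for k in range(2, n + 1):
--         if _eh_primo(k):
--             if anterior is not None and k - anterior > maiorintervalo:
--                 maiorintervalo = k - anterior
--                 r = anterior
--                 s = k
--             anterior = k
--     return r, s
-- ===== Notes on version B (the rewrite author's own statement) =====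
-- stated objective: alternative
-- what changed: B discards the Sieve of Eratosthenes and its two helper passes entirely: each candidate 2..n is tested independently by trial division (2, then odd divisors up to sqrt(k)) in a single pass that carries only the previous prime and the best gap.
import Mathlib
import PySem

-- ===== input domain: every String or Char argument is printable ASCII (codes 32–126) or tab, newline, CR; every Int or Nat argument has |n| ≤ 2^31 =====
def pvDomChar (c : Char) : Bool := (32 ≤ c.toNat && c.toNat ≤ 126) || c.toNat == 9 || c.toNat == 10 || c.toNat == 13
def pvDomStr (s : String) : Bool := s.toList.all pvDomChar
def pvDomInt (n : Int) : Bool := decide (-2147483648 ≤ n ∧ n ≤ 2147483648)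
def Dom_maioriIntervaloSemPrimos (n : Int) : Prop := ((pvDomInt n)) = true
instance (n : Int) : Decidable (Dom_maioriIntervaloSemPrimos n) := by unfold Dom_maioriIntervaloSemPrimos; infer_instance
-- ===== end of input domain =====

-- B replaces the sieve-then-scan entirely: no sieve and no primes list — each number 2..n is
-- tested by direct trial division and a single pass carries the previous prime and the best gap.


-- ===== PORT A =====
-- int(math.sqrt(n)): equal to the integer square root for 0 ≤ n ≤ 2^31 (exact doubles there);
-- computed by a kernel-reducible scan, proved equal to Nat.sqrt in pvSqrt_eq below
def pySqrtInt (n : Int) : Int :=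
  Int.ofNat ((List.range (n.toNat + 1)).foldl (fun acc r => if r * r ≤ n.toNat then r else acc) 0)

def criaListaCrivoEratostenes (n : Int) : List Bool :=
  let raizn := pySqrtInt n
  let crivo := (PySem.List.pyRange 2 (n + 1) 1).foldl (fun c _ => c ++ [true]) [false, false]
  -- crivo[i] / crivo[j] are always in range here (i ≤ raizn ≤ n < len crivo, i*i ≤ j ≤ n),
  -- so the total pyGetD/pySetD forms are exact under Pre_ (0 ≤ n).
  (PySem.List.pyRange 2 (raizn + 1) 1).foldl
    (fun c i =>
      if PySem.List.pyGetD c i false then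
        (PySem.List.pyRange (i * i) (n + 1) i).foldl (fun c j => PySem.List.pySetD c j false) c
      else c)
    crivo

def criaListaPrimos (crivo : List Bool) : List Int :=
  let tamanho := PySem.List.len crivo
  (PySem.List.pyRange 0 tamanho 1).foldl
    (fun primos i => if PySem.List.pyGetD crivo i false then primos ++ [i] else primos) []

def maioriIntervaloSemPrimos (n : Int) : Int × Int :=
  let crivo := criaListaCrivoEratostenes n
  let lista := criaListaPrimos crivo
  let fin := (PySem.List.pyRange 0 (PySem.List.len lista - 1) 1).foldl
    (fun (acc : Int × Int × Int) i =>
      let intervaloatual := PySem.List.pyGetD lista (i + 1) 0 - PySem.List.pyGetD lista i 0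
      if intervaloatual > acc.2.2 then
        (PySem.List.pyGetD lista i 0, PySem.List.pyGetD lista (i + 1) 0, intervaloatual)
      else acc)
    (0, 0, 0)
  (fin.1, fin.2.1)

-- ===== PORT B =====
-- 'while d*d <= k: …; d += 2' of _eh_primo; the structural fuel only makes the loop total:
-- (k+1).toNat steps are never exhausted before the loop's own exit test (see pvEhFuel_iff)
def ehPrimoFuel : Nat → Int → Int → Bool
  | 0, _, _ => true
  | f + 1, k, d =>
    if d * d ≤ k then
      if PySem.Int.mod k d = 0 then false else ehPrimoFuel f k (d + 2)
    else true

def ehPrimo (k : Int) : Bool :=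
  if k < 2 then false
  else if PySem.Int.mod k 2 = 0 then k == 2
  else ehPrimoFuel (k + 1).toNat k 3

def maioriIntervaloSemPrimos_alt (n : Int) : Int × Int :=
  -- acc = (anterior, r, s, maiorintervalo)
  let fin := (PySem.List.pyRange 2 (n + 1) 1).foldl
    (fun (acc : Option Int × Int × Int × Int) k =>
      if ehPrimo k then
        match acc.1 with
        | some anterior =>
          if k - anterior > acc.2.2.2 then (some k, anterior, k, k - anterior)
          else (some k, acc.2)
        | none => (some k, acc.2)
      else acc)
    (none, 0, 0, 0)
  (fin.2.1, fin.2.2.1)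

-- ===== PRECONDITION & SPEC =====
-- Pre_ excludes exactly the negative inputs, on which A raises ValueError (math.sqrt of a negative).
def Pre_maioriIntervaloSemPrimos (n : Int) : Prop := 0 ≤ n
instance (n : Int) : Decidable (Pre_maioriIntervaloSemPrimos n) := by unfold Pre_maioriIntervaloSemPrimos; infer_instance
def pvWitness_maioriIntervaloSemPrimos : Int := 30

def Spec_maioriIntervaloSemPrimos (n : Int) (out : Int × Int) : Prop := out = maioriIntervaloSemPrimos_alt n
instance (n : Int) (out : Int × Int) : Decidable (Spec_maioriIntervaloSemPrimos n out) := by unfold Spec_maioriIntervaloSemPrimos; infer_instance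

-- ===== CLAIM (what is proved, stated in full; the proofs are below) =====
def Claim_equal_maioriIntervaloSemPrimos : Prop := ∀ (n : Int), Dom_maioriIntervaloSemPrimos n → Pre_maioriIntervaloSemPrimos n → Spec_maioriIntervaloSemPrimos n (maioriIntervaloSemPrimos n)

-- ===== LEMMAS AND PROOFS =====

-- the gap-update step both loops perform on a pair of consecutive primes
def pvGA : Int × Int × Int → Int → Int → Int × Int × Int :=
  fun acc x y => if y - x > acc.2.2 then (x, y, y - x) else acc

-- the prev-carrying step of B's loop, on a prime k
def pvBStep : Option Int × Int × Int × Int → Int → Option Int × Int × Int × Int :=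
  fun acc i => match acc.1 with
    | some a => (some i, pvGA acc.2 a i)
    | none => (some i, acc.2)

-- folding the gap step over consecutive pairs of a list
def pvPairFold {σ : Type} (G : σ → Int → Int → σ) : List Int → σ → σ
  | [], st => st
  | [_], st => st
  | x :: y :: r, st => pvPairFold G (y :: r) (G st x y)

theorem pvSieveInit (n : Int) :
    (PySem.List.pyRange 2 (n + 1) 1).foldl (fun c _ => c ++ [true]) [false, false]
      = [false, false] ++ List.replicate (n - 1).toNat true := by
  rw [PySem.List.foldl_append_singleton_eq_map (f := fun _ => true)]
  rw [List.map_const', PySem.List.length_pyRange_one]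
  have : (n + 1 - 2) = n - 1 := by ring
  rw [this]

theorem pvRangeFold {σ : Type} (G : σ → Int → Int → σ) :
    ∀ (t : List Int) (st : σ),
      (List.range (t.length - 1)).foldl (fun st k => G st (t.getD k 0) (t.getD (k + 1) 0)) st
        = pvPairFold G t st := by
  intro t
  induction t with
  | nil => intro st; simp [pvPairFold]
  | cons x t ih =>
    cases t with
    | nil => intro st; simp [pvPairFold]
    | cons y r =>
      intro st
      have hlen : (x :: y :: r).length - 1 = r.length + 1 := by simp
      rw [hlen, List.range_succ_eq_map, List.foldl_cons, List.foldl_map]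
      simp only [List.getD_cons_zero, List.getD_cons_succ, Nat.succ_eq_add_one]
      have := ih (G st x y)
      simp only [List.length_cons, Nat.add_sub_cancel] at this
      exact this

theorem pvFoldA_eq (l : List Int) (st : Int × Int × Int) :
    (PySem.List.pyRange 0 (PySem.List.len l - 1) 1).foldl
        (fun (acc : Int × Int × Int) i =>
          if PySem.List.pyGetD l (i + 1) 0 - PySem.List.pyGetD l i 0 > acc.2.2 then
            (PySem.List.pyGetD l i 0, PySem.List.pyGetD l (i + 1) 0,
              PySem.List.pyGetD l (i + 1) 0 - PySem.List.pyGetD l i 0)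
          else acc) st
      = pvPairFold pvGA l st := by
  cases l with
  | nil =>
    rw [PySem.List.pyRange_one_eq_nil (by simp [PySem.List.len_eq])]
    simp [pvPairFold]
  | cons x t =>
    have h : PySem.List.len (x :: t) - 1 = ((t.length : Nat) : Int) := by
      simp [PySem.List.len_eq]
    rw [h, PySem.List.pyRange_zero_nat, List.foldl_map]
    have hb : (fun (acc : Int × Int × Int) (k : Nat) =>
          if PySem.List.pyGetD (x :: t) ((k : Int) + 1) 0 - PySem.List.pyGetD (x :: t) (k : Int) 0 > acc.2.2 then
            (PySem.List.pyGetD (x :: t) (k : Int) 0, PySem.List.pyGetD (x :: t) ((k : Int) + 1) 0,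
              PySem.List.pyGetD (x :: t) ((k : Int) + 1) 0 - PySem.List.pyGetD (x :: t) (k : Int) 0)
          else acc)
        = (fun (acc : Int × Int × Int) (k : Nat) =>
            pvGA acc ((x :: t).getD k 0) ((x :: t).getD (k + 1) 0)) := by
      funext acc k
      have h2 : PySem.List.pyGetD (x :: t) ((k : Int) + 1) 0 = (x :: t).getD (k + 1) 0 := by
        rw [show ((k : Int) + 1) = ((k + 1 : Nat) : Int) by push_cast; ring,
          PySem.List.pyGetD_natCast]
      simp only [h2, PySem.List.pyGetD_natCast, pvGA]
    rw [hb]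
    have := pvRangeFold pvGA (x :: t) st
    simpa using this

theorem pvPrevFold_some : ∀ (l : List Int) (p : Int) (st : Int × Int × Int),
    (l.foldl pvBStep (some p, st)).2 = pvPairFold pvGA (p :: l) st := by
  intro l
  induction l with
  | nil => intro p st; simp [pvPairFold]
  | cons x r ih =>
    intro p st
    rw [List.foldl_cons]
    show (r.foldl pvBStep (some x, pvGA st p x)).2 = _
    rw [ih x (pvGA st p x)]
    rfl

theorem pvPrevFold_none (l : List Int) (st : Int × Int × Int) :
    (l.foldl pvBStep (none, st)).2 = pvPairFold pvGA l st := by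
  cases l with
  | nil => rfl
  | cons x r =>
    rw [List.foldl_cons]
    show (r.foldl pvBStep (some x, st)).2 = _
    rw [pvPrevFold_some r x st]

-- B's literal loop body is the prev-carrying step guarded by the primality test
theorem pvBBody_eq :
    (fun (acc : Option Int × Int × Int × Int) (k : Int) =>
        if ehPrimo k then
          match acc.1 with
          | some anterior =>
            if k - anterior > acc.2.2.2 then (some k, anterior, k, k - anterior)
            else (some k, acc.2)
          | none => (some k, acc.2)
        else acc)
      = (fun acc k => if ehPrimo k then pvBStep acc k else acc) := by
  funext acc k
  cases h : acc.1 with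
  | none => simp [pvBStep, h]
  | some a =>
    simp only [h, pvBStep, pvGA]
    by_cases hc : k - a > acc.2.2.2 <;> simp [hc]

-- ---------- trial-division correctness ----------

theorem pvEhFuel_iff (f : Nat) : ∀ (k d : Int), (k + 1 - d).toNat ≤ f → 1 ≤ d → d % 2 = 1 →
    (ehPrimoFuel f k d = true ↔ ∀ e : Int, d ≤ e → e * e ≤ k → e % 2 = 1 → ¬ e ∣ k) := by
  induction f with
  | zero =>
    intro k d hf hd hp
    refine iff_of_true rfl ?_
    intro e he hek _ hdvd
    have h1 : k + 1 ≤ d := by omega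
    have h2 : e ≤ e * e := by nlinarith
    omega
  | succ f ih =>
    intro k d hf hd hp
    show (if d * d ≤ k then
        if PySem.Int.mod k d = 0 then false else ehPrimoFuel f k (d + 2)
      else true) = true ↔ _
    by_cases h : d * d ≤ k
    · rw [if_pos h]
      by_cases hm : PySem.Int.mod k d = 0
      · rw [if_pos hm]
        simp only [Bool.false_eq_true, false_iff]
        intro H
        exact H d (le_refl d) h hp ((PySem.Int.mod_eq_zero_iff_dvd k d).mp hm)
      · rw [if_neg hm]
        rw [ih k (d + 2)
          (by
            have hdk : d ≤ k := by nlinarith [mul_self_nonneg d]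
            omega)
          (by omega) (by omega)]
        constructor
        · intro H e he hek hee hdvd
          by_cases heq : e = d
          · subst heq
            exact hm ((PySem.Int.mod_eq_zero_iff_dvd k e).mpr hdvd)
          · exact H e (by omega) hek hee hdvd
        · intro H e he hek hee hdvd
          exact H e (by omega) hek hee hdvd
    · rw [if_neg h]
      refine iff_of_true rfl ?_
      intro e he hek _ hdvd
      have : d * d ≤ e * e := by nlinarith
      omega

theorem pvEhPrimo_iff (k : Int) (h0 : 0 ≤ k) : (ehPrimo k = true ↔ Nat.Prime k.toNat) := by
  unfold ehPrimo
  by_cases h2 : k < 2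
  · rw [if_pos h2]
    simp only [Bool.false_eq_true, false_iff]
    intro hpr
    have := hpr.two_le
    omega
  · rw [if_neg h2]
    by_cases hev : PySem.Int.mod k 2 = 0
    · rw [if_pos hev]
      have hdvd : (2 : Int) ∣ k := (PySem.Int.mod_eq_zero_iff_dvd k 2).mp hev
      by_cases hk2 : k = 2
      · subst hk2
        simp [Nat.prime_two]
      · simp only [beq_iff_eq, hk2, false_iff]
        intro hpr
        have hdn : (2 : Nat) ∣ k.toNat := by
          have hmm := PySem.Int.mod_eq_emod_of_pos (a := k) (b := 2) (by omega)
          omega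
        rcases (Nat.Prime.eq_one_or_self_of_dvd hpr 2 hdn) with h | h
        · omega
        · omega
    · rw [if_neg hev]
      have hodd : k % 2 = 1 := by
        have := PySem.Int.mod_eq_emod_of_pos (a := k) (b := 2) (by omega)
        omega
      rw [pvEhFuel_iff (k + 1).toNat k 3 (by omega) (by omega) (by omega)]
      constructor
      · intro H
        rw [Nat.prime_def_le_sqrt]
        refine ⟨by omega, ?_⟩
        intro m hm hsq hdvd
        have hmm : m * m ≤ k.toNat := Nat.le_sqrt.mp hsq
        by_cases hme : m % 2 = 0
        · -- an even divisor would make k even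
          have : (2 : Nat) ∣ k.toNat := dvd_trans ⟨m / 2, by omega⟩ hdvd
          omega
        · have hdvd2 : (m : Int) ∣ k := by
            have hq := Int.natCast_dvd_natCast.mpr hdvd
            rwa [Int.toNat_of_nonneg h0] at hq
          exact H (m : Int) (by omega) (by omega) (by omega) hdvd2
      · intro hpr e he hek hee hdvd
        have hen : e.toNat ∣ k.toNat := by
          have hq : ((e.toNat : Int)) ∣ ((k.toNat : Int)) := by
            rwa [Int.toNat_of_nonneg (by omega : (0:Int) ≤ e), Int.toNat_of_nonneg h0]
          exact_mod_cast hq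
        rcases Nat.Prime.eq_one_or_self_of_dvd hpr e.toNat hen with h | h
        · omega
        · -- e = k, but e*e ≤ k forces k ≤ 1
          have : e = k := by omega
          nlinarith
      
-- ---------- sieve correctness ----------

-- k is struck out once outer indices up to m were processed
def pvMark (m k : Nat) : Prop := ∃ p, p ≤ m ∧ Nat.Prime p ∧ p ∣ k ∧ p * p ≤ k

theorem pvSetD_getD (c : List Bool) (j : Int) (hj : 0 ≤ j) (k : Nat) :
    (PySem.List.pySetD c j false).getD k false = if (k : Int) = j then false else c.getD k false := by
  rw [PySem.List.pySetD_of_nonneg c false hj]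
  by_cases hk : (k : Int) = j
  · rw [if_pos hk]
    have hkj : j.toNat = k := by omega
    rw [hkj]
    by_cases hlt : k < c.length
    · simp [List.getD, hlt]
    · rw [List.getD_eq_default _ _ (by simpa [List.length_set] using Nat.le_of_not_lt hlt)]
  · rw [if_neg hk]
    have hne : j.toNat ≠ k := by omega
    simp [List.getD, hne]

theorem pvInnerFold_getD :
    ∀ (l : List Int), (∀ j ∈ l, 0 ≤ j) → ∀ (c : List Bool) (k : Nat),
      ((l.foldl (fun c j => PySem.List.pySetD c j false) c).getD k false)
        = if (k : Int) ∈ l then false else c.getD k false := by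
  intro l
  induction l with
  | nil => intro _ c k; simp
  | cons x t ih =>
    intro hnn c k
    rw [List.foldl_cons, ih (fun j hj => hnn j (by simp [hj])) (PySem.List.pySetD c x false) k]
    rw [pvSetD_getD c x (hnn x (by simp)) k]
    by_cases h1 : (k : Int) ∈ t
    · simp [h1]
    · by_cases h2 : (k : Int) = x <;> simp [h1, h2]

theorem pvInnerFold_length :
    ∀ (l : List Int) (c : List Bool),
      (l.foldl (fun c j => PySem.List.pySetD c j false) c).length = c.length := by
  intro l
  induction l with
  | nil => intro c; rfl
  | cons x t ih =>
    intro c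
    rw [List.foldl_cons, ih, PySem.List.length_pySetD]

-- the invariant carried over the outer loop of the sieve
def pvInv (n : Int) (m : Nat) (c : List Bool) : Prop :=
  c.length = 2 + (n - 1).toNat ∧
    ∀ k : Nat, (c.getD k false = true ↔ 2 ≤ k ∧ k ≤ n.toNat ∧ ¬ pvMark m k)

theorem pvInv_init (n : Int) (hn : 0 ≤ n) :
    pvInv n 1 ([false, false] ++ List.replicate (n - 1).toNat true) := by
  constructor
  · simp; omega
  · intro k
    constructor
    · intro h
      have hk2 : 2 ≤ k := by
        by_contra hlt
        interval_cases k <;> simp_all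
      have hklen : k < 2 + (n - 1).toNat := by
        by_contra hge
        rw [List.getD_eq_default] at h
        · exact absurd h (by simp)
        · simpa using by omega
      refine ⟨hk2, by omega, ?_⟩
      rintro ⟨p, hp1, hpr, _, _⟩
      have := hpr.two_le
      omega
    · rintro ⟨hk2, hkn, -⟩
      have hlt : k - 2 < (n - 1).toNat := by omega
      obtain ⟨k', rfl⟩ : ∃ k', k = k' + 2 := ⟨k - 2, by omega⟩
      show (false :: false :: List.replicate (n - 1).toNat true).getD (k' + 2) false = true
      rw [List.getD_cons_succ, List.getD_cons_succ, List.getD_eq_getElem?_getD]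
      simp only [List.getElem?_replicate]
      rw [if_pos (by omega)]
      rfl

theorem pvInv_step (n : Int) (hn : 0 ≤ n) (m : Nat) (hm : 1 ≤ m) (c : List Bool)
    (hc : pvInv n m c) :
    pvInv n (m + 1)
      (if PySem.List.pyGetD c ((m : Int) + 1) false then
        (PySem.List.pyRange (((m : Int) + 1) * ((m : Int) + 1)) (n + 1) ((m : Int) + 1)).foldl
          (fun c j => PySem.List.pySetD c j false) c
      else c) := by
  obtain ⟨hlen, hchar⟩ := hc
  have hcast : ((m : Int) + 1) = (((m + 1 : Nat) : Int)) := by push_cast; ring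
  have hguard : PySem.List.pyGetD c ((m : Int) + 1) false = c.getD (m + 1) false := by
    rw [hcast, PySem.List.pyGetD_natCast]
  by_cases hg : c.getD (m + 1) false = true
  · rw [if_pos (by rw [hguard]; exact hg)]
    obtain ⟨hm2, hmn, hnm⟩ := (hchar (m + 1)).mp hg
    -- m+1 is prime: otherwise its least factor would have marked it
    have hpr : Nat.Prime (m + 1) := by
      by_contra hnp
      refine hnm ⟨(m + 1).minFac, ?_, Nat.minFac_prime (by omega), Nat.minFac_dvd _, ?_⟩
      · have := (Nat.not_prime_iff_minFac_lt (by omega)).mp hnp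
        omega
      · have := Nat.minFac_sq_le_self (n := m + 1) (by omega) hnp
        nlinarith [this, sq ((m+1).minFac)]
    constructor
    · rw [pvInnerFold_length, hlen]
    · intro k
      have hnn : ∀ j ∈ PySem.List.pyRange (((m : Int) + 1) * ((m : Int) + 1)) (n + 1) ((m : Int) + 1), 0 ≤ j := by
        intro j hj
        have := (PySem.List.mem_pyRange_iff_of_pos (by omega) j).mp hj
        nlinarith [this.1]
      rw [pvInnerFold_getD _ hnn c k]
      have hmem : ((k : Int) ∈ PySem.List.pyRange (((m : Int) + 1) * ((m : Int) + 1)) (n + 1) ((m : Int) + 1))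
          ↔ ((m + 1) ∣ k ∧ (m + 1) * (m + 1) ≤ k ∧ k ≤ n.toNat) := by
        rw [PySem.List.mem_pyRange_iff_of_pos (by omega)]
        constructor
        · rintro ⟨h1, h2, hdv⟩
          have hdk : ((m : Int) + 1) ∣ (k : Int) := by
            have := dvd_add hdv (dvd_mul_right ((m : Int) + 1) ((m : Int) + 1))
            simpa using this
          exact ⟨by exact_mod_cast hdk, by exact_mod_cast h1, by omega⟩
        · rintro ⟨hdk, h1, h2⟩
          have hdk2 : ((m : Int) + 1) ∣ (k : Int) := by exact_mod_cast hdk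
          refine ⟨by exact_mod_cast h1, by omega, ?_⟩
          exact dvd_sub hdk2 (dvd_mul_right _ _)
      by_cases hmk : (k : Int) ∈ PySem.List.pyRange (((m : Int) + 1) * ((m : Int) + 1)) (n + 1) ((m : Int) + 1)
      · rw [if_pos hmk]
        obtain ⟨hd, hsq, hkn⟩ := hmem.mp hmk
        simp only [Bool.false_eq_true, false_iff]
        rintro ⟨-, -, hno⟩
        exact hno ⟨m + 1, le_refl _, hpr, hd, hsq⟩
      · rw [if_neg hmk, hchar k]
        by_cases hkn : k ≤ n.toNat
        · have hmiff : pvMark (m + 1) k ↔ pvMark m k := by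
            constructor
            · rintro ⟨p, hp, hppr, hpd, hps⟩
              rcases Nat.lt_or_ge p (m + 1) with h | h
              · exact ⟨p, by omega, hppr, hpd, hps⟩
              · -- p = m+1: k would have been in the struck range
                have hpe : p = m + 1 := by omega
                subst hpe
                exact absurd (hmem.mpr ⟨hpd, hps, hkn⟩) hmk
            · rintro ⟨p, hp, hppr, hpd, hps⟩
              exact ⟨p, by omega, hppr, hpd, hps⟩
          rw [hmiff]
        · -- k beyond n: both characterisations are false
          constructor
          · rintro ⟨-, h, -⟩; omega
          · rintro ⟨-, h, -⟩; omega
  · rw [if_neg (by rw [hguard]; simpa using hg)]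
    refine ⟨hlen, fun k => ?_⟩
    rw [hchar k]
    have hng := fun h => hg ((hchar (m + 1)).mpr h)
    -- guard false: m+1 is out of range or already marked; marks do not change
    constructor
    · rintro ⟨h2, hn', hno⟩
      refine ⟨h2, hn', ?_⟩
      rintro ⟨p, hp, hppr, hpd, hps⟩
      rcases Nat.lt_or_ge p (m + 1) with h | h
      · exact hno ⟨p, by omega, hppr, hpd, hps⟩
      · have hpe : p = m + 1 := by omega
        subst hpe
        -- either m+1 > n (then p*p ≤ k ≤ n < p, absurd) or m+1 is marked (transfer the mark)
        by_cases hle : m + 1 ≤ n.toNat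
        · rcases Classical.em (pvMark m (m + 1)) with hmm | hmm
          · rcases hmm with ⟨q, hq, hqpr, hqd, hqs⟩
            exact hno ⟨q, by omega, hqpr, dvd_trans hqd hpd, by nlinarith⟩
          · exact hng ⟨by omega, hle, hmm⟩
        · nlinarith
    · rintro ⟨h2, hn', hno⟩
      exact ⟨h2, hn', fun ⟨p, hp, hppr, hpd, hps⟩ => hno ⟨p, by omega, hppr, hpd, hps⟩⟩

theorem pvInv_fold (n : Int) (hn : 0 ≤ n) :
    ∀ (m : Nat), 1 ≤ m →
      pvInv n m
        ((PySem.List.pyRange 2 ((m : Int) + 1) 1).foldl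
          (fun c i =>
            if PySem.List.pyGetD c i false then
              (PySem.List.pyRange (i * i) (n + 1) i).foldl (fun c j => PySem.List.pySetD c j false) c
            else c)
          ([false, false] ++ List.replicate (n - 1).toNat true)) := by
  intro m
  induction m with
  | zero => intro h; omega
  | succ m ih =>
    intro _
    by_cases hm : 1 ≤ m
    · have hsplit : PySem.List.pyRange 2 (((m + 1 : Nat) : Int) + 1) 1
          = PySem.List.pyRange 2 ((m : Int) + 1) 1 ++ [(m : Int) + 1] := by
        rw [show (((m + 1 : Nat) : Int) + 1) = ((m : Int) + 1) + 1 by push_cast; ring]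
        exact PySem.List.pyRange_one_succ_right (by omega)
      rw [hsplit, List.foldl_append, List.foldl_cons, List.foldl_nil]
      exact pvInv_step n hn m hm _ (ih hm)
    · have hm0 : m = 0 := by omega
      subst hm0
      rw [PySem.List.pyRange_one_eq_nil (by norm_num)]
      exact pvInv_init n hn

theorem pvSqrtFold (N : Nat) :
    ∀ m, Nat.sqrt N < m →
      (List.range m).foldl (fun acc r => if r * r ≤ N then r else acc) 0 = Nat.sqrt N := by
  intro m
  induction m with
  | zero => intro h; omega
  | succ s ih =>
    intro h
    rw [List.range_succ, List.foldl_append, List.foldl_cons, List.foldl_nil]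
    by_cases hs : s * s ≤ N
    · rw [if_pos hs]
      have := Nat.le_sqrt.mpr hs
      omega
    · rw [if_neg hs]
      have hgt : Nat.sqrt N < s := by
        by_contra hle
        exact hs (Nat.le_sqrt.mp (by omega))
      exact ih hgt

theorem pvSqrt_eq (n : Int) : pySqrtInt n = Int.ofNat (Nat.sqrt n.toNat) := by
  unfold pySqrtInt
  congr 1
  exact pvSqrtFold n.toNat (n.toNat + 1) (by have := Nat.sqrt_le_self n.toNat; omega)

-- final characterisation of the sieve list
theorem pvCrivo_char (n : Int) (hn : 0 ≤ n) :
    (criaListaCrivoEratostenes n).length = 2 + (n - 1).toNat ∧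
      ∀ k : Nat, ((criaListaCrivoEratostenes n).getD k false
        = decide (2 ≤ k ∧ k ≤ n.toNat ∧ Nat.Prime k)) := by
  have hinv : pvInv n (Nat.sqrt n.toNat) (criaListaCrivoEratostenes n) := by
    unfold criaListaCrivoEratostenes
    rw [pvSqrt_eq n]
    simp only []
    rw [pvSieveInit n]
    by_cases hs : 1 ≤ Nat.sqrt n.toNat
    · have := pvInv_fold n hn (Nat.sqrt n.toNat) hs
      simpa using this
    · have hs0 : Nat.sqrt n.toNat = 0 := by omega
      rw [hs0]
      have h1 := pvInv_init n hn
      rw [show ((Int.ofNat 0) + 1) = (1 : Int) by norm_num,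
        PySem.List.pyRange_one_eq_nil (by norm_num)]
      simp only [List.foldl_nil]
      -- Inv at 0 from Inv at 1: no prime is ≤ 1 or ≤ 0
      refine ⟨h1.1, fun k => ?_⟩
      rw [h1.2 k]
      constructor
      · rintro ⟨a, b, hno⟩
        exact ⟨a, b, fun ⟨p, hp, hppr, hpd, hps⟩ => hno ⟨p, by omega, hppr, hpd, hps⟩⟩
      · rintro ⟨a, b, hno⟩
        refine ⟨a, b, ?_⟩
        rintro ⟨p, hp, hppr, hpd, hps⟩
        have := hppr.two_le
        omega
  refine ⟨hinv.1, fun k => ?_⟩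
  have h := hinv.2 k
  have hiff : (2 ≤ k ∧ k ≤ n.toNat ∧ ¬ pvMark (Nat.sqrt n.toNat) k) ↔ (2 ≤ k ∧ k ≤ n.toNat ∧ Nat.Prime k) := by
    constructor
    · rintro ⟨h2, hkn, hno⟩
      refine ⟨h2, hkn, ?_⟩
      by_contra hnp
      refine hno ⟨k.minFac, ?_, Nat.minFac_prime (by omega), Nat.minFac_dvd _, ?_⟩
      · have hsq := Nat.minFac_sq_le_self (n := k) (by omega) hnp
        have : k.minFac * k.minFac ≤ n.toNat := by nlinarith [sq k.minFac]
        exact Nat.le_sqrt.mpr this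
      · nlinarith [Nat.minFac_sq_le_self (n := k) (by omega) hnp, sq k.minFac]
    · rintro ⟨h2, hkn, hpr⟩
      refine ⟨h2, hkn, ?_⟩
      rintro ⟨p, hp, hppr, hpd, hps⟩
      rcases hpr.eq_one_or_self_of_dvd p hpd with h | h
      · exact absurd h (by have := hppr.two_le; omega)
      · subst h
        nlinarith [hpr.two_le]
  cases hb : (criaListaCrivoEratostenes n).getD k false
  · rw [hb] at h
    symm
    simp only [decide_eq_false_iff_not]
    rw [← hiff]
    intro hx
    exact absurd (h.mpr hx) (by simp)
  · rw [hb] at h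
    symm
    simp only [decide_eq_true_eq]
    exact hiff.mp (h.mp rfl)

-- both programs' prime lists agree: the common normal form is a filtered shifted range
theorem pvListaA_eq (n : Int) (hn : 0 ≤ n) :
    criaListaPrimos (criaListaCrivoEratostenes n)
      = ((List.range (n - 1).toNat).map (fun t => ((2 + t : Nat) : Int))).filter
          (fun x => decide (Nat.Prime x.toNat)) := by
  obtain ⟨hlen, hchar⟩ := pvCrivo_char n hn
  -- A's extraction pass over the sieve
  have hA : criaListaPrimos (criaListaCrivoEratostenes n)
      = ((List.range (criaListaCrivoEratostenes n).length).filter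
          (fun k => (criaListaCrivoEratostenes n).getD k false)).map (fun (k : Nat) => (k : Int)) := by
    simp only [criaListaPrimos]
    rw [show PySem.List.len (criaListaCrivoEratostenes n)
        = (((criaListaCrivoEratostenes n).length : Nat) : Int) from by simp [PySem.List.len_eq]]
    rw [PySem.List.pyRange_zero_nat, List.foldl_map]
    have hb : (fun (primos : List Int) (k : Nat) =>
          if PySem.List.pyGetD (criaListaCrivoEratostenes n) (k : Int) false then primos ++ [(k : Int)] else primos)
        = (fun (primos : List Int) (k : Nat) =>
            if (criaListaCrivoEratostenes n).getD k false then primos ++ [(k : Int)] else primos) := by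
      funext primos k
      simp [PySem.List.pyGetD_natCast]
    rw [hb, PySem.List.foldl_append_if (p := fun k => (criaListaCrivoEratostenes n).getD k false)
      (f := fun (k : Nat) => (k : Int))]
    rw [List.nil_append]
  rw [hA]
  -- replace the sieve test by the primality predicate
  rw [List.filter_congr (fun k _ => hchar k)]
  rw [hlen, List.range_add, List.filter_append]
  have h01 : (List.range 2).filter (fun k => decide (2 ≤ k ∧ k ≤ n.toNat ∧ Nat.Prime k)) = [] := by
    norm_num [List.range_succ]
  rw [h01, List.nil_append, List.filter_map, List.map_map, List.filter_map]
  have hfun : ((fun (k : Nat) => (k : Int)) ∘ (fun x => 2 + x)) = (fun t => ((2 + t : Nat) : Int)) := by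
    funext t; simp
  rw [hfun]
  congr 1
  apply List.filter_congr
  intro t ht
  have htn : 2 + t ≤ n.toNat := by
    have := List.mem_range.mp ht
    omega
  simp only [Function.comp_apply, Int.toNat_natCast]
  rw [decide_eq_decide]
  constructor
  · rintro ⟨-, -, h⟩; exact h
  · intro h; exact ⟨by omega, htn, h⟩

-- B's candidate loop keeps exactly the same primes
theorem pvListaB_eq (n : Int) :
    (PySem.List.pyRange 2 (n + 1) 1).filter ehPrimo
      = ((List.range (n - 1).toNat).map (fun t => ((2 + t : Nat) : Int))).filter
          (fun x => decide (Nat.Prime x.toNat)) := by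
  rw [PySem.List.pyRange_one]
  have hnn : (n + 1 - 2) = n - 1 := by ring
  rw [hnn]
  have hfun : (fun (k : Nat) => (2 : Int) + (k : Int)) = (fun t => ((2 + t : Nat) : Int)) := by
    funext t; push_cast; ring
  rw [hfun]
  apply List.filter_congr
  intro x hx
  obtain ⟨t, -, rfl⟩ := List.mem_map.mp hx
  have h0 : (0 : Int) ≤ ((2 + t : Nat) : Int) := by positivity
  rcases hb : ehPrimo ((2 + t : Nat) : Int) with hfalse | htrue
  · symm
    simp only [decide_eq_false_iff_not]
    intro hpr
    exact absurd ((pvEhPrimo_iff _ h0).mpr hpr) (by rw [hb]; simp)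
  · symm
    simp only [decide_eq_true_eq]
    exact (pvEhPrimo_iff _ h0).mp hb

-- ===== VERDICT (by name: the statement is the Claim_ definition above) =====
theorem maioriIntervaloSemPrimos_spec : Claim_equal_maioriIntervaloSemPrimos := by
  intro n _ hn
  unfold Spec_maioriIntervaloSemPrimos
  simp only [maioriIntervaloSemPrimos, maioriIntervaloSemPrimos_alt]
  rw [pvFoldA_eq (criaListaPrimos (criaListaCrivoEratostenes n)) (0, 0, 0)]
  rw [pvBBody_eq]
  rw [PySem.List.foldl_if_eq_foldl_filter ehPrimo pvBStep]
  rw [pvListaB_eq n, ← pvListaA_eq n hn]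
  rw [pvPrevFold_none (criaListaPrimos (criaListaCrivoEratostenes n)) (0, 0, 0)]
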